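-- pv_equiv track=rewrite | github.com/pse-deepinstinct/Public-Scripts | policy_and_user_audit.py | data_from_more_than_one_msp
-- ===== SOURCE A (Python) =====
-- def data_from_more_than_one_msp(policies):
--     policy_msp_ids = []
--     for policy in policies:
--         if policy['msp_id'] not in policy_msp_ids:
--             policy_msp_ids.append(policy['msp_id'])
--     if len(policy_msp_ids) > 1:
--         return True
--     else:
--         return False
-- ===== SOURCE B (Python) =====
-- def data_from_more_than_one_msp(policies):
--     it = iter(policies)
--     first = next(it, None)
--     if first is None:
--         return False
--     ref = first['msp_id']
--     for policy in it:
--         if policy['msp_id'] != ref: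
--             return True
--     return False
-- ===== Notes on version B (the rewrite author's own statement) =====
-- stated objective: simpler
-- what changed: Instead of building a growing list of distinct msp_ids with repeated membership tests, B takes the first policy's msp_id as a reference and returns True on the first policy whose msp_id differs, with early exit.
import Mathlib
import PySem

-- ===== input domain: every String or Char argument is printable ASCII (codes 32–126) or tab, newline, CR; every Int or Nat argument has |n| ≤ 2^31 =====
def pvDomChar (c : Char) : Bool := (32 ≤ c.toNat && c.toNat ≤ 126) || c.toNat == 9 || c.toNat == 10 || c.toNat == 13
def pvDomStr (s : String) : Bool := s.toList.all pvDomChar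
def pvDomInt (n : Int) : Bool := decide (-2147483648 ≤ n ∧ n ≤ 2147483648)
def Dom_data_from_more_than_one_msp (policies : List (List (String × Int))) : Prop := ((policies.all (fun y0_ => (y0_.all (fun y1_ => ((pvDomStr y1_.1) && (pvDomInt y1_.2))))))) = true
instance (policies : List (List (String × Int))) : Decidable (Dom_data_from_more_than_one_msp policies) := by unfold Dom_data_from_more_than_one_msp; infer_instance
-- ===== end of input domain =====

-- B replaces A's growing list of distinct msp_ids (with a membership test per policy)
-- by a single scalar reference — the first policy's msp_id — and an early-exit scan
-- for any differing msp_id (objective: simpler).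

-- shared helper: policy['msp_id'] as an association-list lookup (first match);
-- Python raises KeyError when the key is missing — those inputs are excluded by Pre_,
-- the port returns a dummy 0 there (never relied upon inside Pre_).
def pvMsp (policy : List (String × Int)) : Int :=
  ((policy.find? (fun kv => kv.1 == "msp_id")).map (·.2)).getD 0

-- ===== PORT A =====
def data_from_more_than_one_msp (policies : List (List (String × Int))) : Bool :=
  let ids := policies.foldl
    (fun acc policy => if pvMsp policy ∈ acc then acc else acc ++ [pvMsp policy]) []
  if ids.length > 1 then true else false

-- ===== PORT B =====
def data_from_more_than_one_msp_alt (policies : List (List (String × Int))) : Bool :=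
  match policies with
  | [] => false
  | first :: rest => rest.any (fun policy => pvMsp policy != pvMsp first)

-- ===== PRECONDITION & SPEC =====
-- Pre_ excludes exactly the inputs where Python A raises KeyError: a policy without the 'msp_id' key.
def Pre_data_from_more_than_one_msp (policies : List (List (String × Int))) : Prop :=
  ∀ policy ∈ policies, (policy.find? (fun kv => kv.1 == "msp_id")).isSome
instance (policies : List (List (String × Int))) : Decidable (Pre_data_from_more_than_one_msp policies) := by unfold Pre_data_from_more_than_one_msp; infer_instance
def pvWitness_data_from_more_than_one_msp : (List (List (String × Int))) :=
  [[("msp_id", 1)], [("msp_id", 2), ("name", 7)]]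

def Spec_data_from_more_than_one_msp (policies : List (List (String × Int))) (out : Bool) : Prop := out = data_from_more_than_one_msp_alt policies
instance (policies : List (List (String × Int))) (out : Bool) : Decidable (Spec_data_from_more_than_one_msp policies out) := by unfold Spec_data_from_more_than_one_msp; infer_instance

-- ===== CLAIM (what is proved, stated in full; the proofs are below) =====
def Claim_equal_data_from_more_than_one_msp : Prop := ∀ (policies : List (List (String × Int))), Dom_data_from_more_than_one_msp policies → Pre_data_from_more_than_one_msp policies → Spec_data_from_more_than_one_msp policies (data_from_more_than_one_msp policies)

-- ===== LEMMAS AND PROOFS =====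

-- A's accumulator step, lifted to the msp_id values
def pvStep (acc : List Int) (m : Int) : List Int := if m ∈ acc then acc else acc ++ [m]

theorem pv_mem_foldl_step (l : List Int) (acc : List Int) (a : Int) (h : a ∈ acc) :
    a ∈ l.foldl pvStep acc := by
  induction l generalizing acc with
  | nil => exact h
  | cons m t ih =>
      exact ih _ (by simp only [pvStep]; split <;> simp [h])

theorem pv_elem_foldl_step (l : List Int) (acc : List Int) (m : Int) (h : m ∈ l) :
    m ∈ l.foldl pvStep acc := by
  induction l generalizing acc with
  | nil => cases h
  | cons x t ih =>
      rcases List.mem_cons.mp h with h | h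
      · subst h
        simp only [List.foldl_cons]
        refine pv_mem_foldl_step _ _ _ ?_
        by_cases hm : m ∈ acc <;> simp [pvStep, hm]
      · exact ih _ h

theorem pv_foldl_all_eq (l : List Int) (ref : Int) (h : ∀ m ∈ l, m = ref) :
    l.foldl pvStep [ref] = [ref] := by
  induction l with
  | nil => rfl
  | cons x t ih =>
      have hx : x = ref := h x (by simp)
      subst hx
      simp only [List.foldl_cons]
      have : pvStep [x] x = [x] := by simp [pvStep]
      rw [this]
      exact ih (fun m hm => h m (by simp [hm]))

theorem pv_two_mem_length (L : List Int) (x y : Int) (hx : x ∈ L) (hy : y ∈ L) (hne : x ≠ y) :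
    1 < L.length := by
  cases L with
  | nil => cases hx
  | cons a t =>
      cases t with
      | nil =>
          simp at hx hy
          exact absurd (hx.trans hy.symm) hne
      | cons b t' => simp

-- ===== VERDICT (by name: the statement is the Claim_ definition above) =====
theorem data_from_more_than_one_msp_spec : Claim_equal_data_from_more_than_one_msp := by
  intro policies _ _
  unfold Spec_data_from_more_than_one_msp
  unfold data_from_more_than_one_msp data_from_more_than_one_msp_alt
  cases policies with
  | nil => rfl
  | cons first rest =>
      simp only [List.foldl_cons]
      have hfold : ∀ (l : List (List (String × Int))) (acc : List Int),
          l.foldl (fun acc policy => if pvMsp policy ∈ acc then acc else acc ++ [pvMsp policy]) acc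
            = (l.map pvMsp).foldl pvStep acc := by
        intro l
        induction l with
        | nil => intro acc; rfl
        | cons x t ih => intro acc; simp only [List.foldl_cons, List.map_cons, pvStep]; exact ih _
      have hstart : (if pvMsp first ∈ ([] : List Int) then ([] : List Int) else [] ++ [pvMsp first]) = [pvMsp first] := by simp
      simp only [hstart, hfold]
      set ref := pvMsp first with href
      by_cases hdiff : ∃ policy ∈ rest, pvMsp policy ≠ ref
      · rcases hdiff with ⟨p, hp, hne⟩
        have hmem : pvMsp p ∈ (rest.map pvMsp).foldl pvStep [ref] :=
          pv_elem_foldl_step _ _ _ (List.mem_map.mpr ⟨p, hp, rfl⟩)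
        have hrefm : ref ∈ (rest.map pvMsp).foldl pvStep [ref] :=
          pv_mem_foldl_step _ _ _ (by simp)
        have hlen := pv_two_mem_length _ _ _ hmem hrefm hne
        have hany : rest.any (fun policy => pvMsp policy != ref) = true := by
          simp only [List.any_eq_true, bne_iff_ne]
          exact ⟨p, hp, hne⟩
        simp [hlen, hany]
      · push Not at hdiff
        have hall : ∀ m ∈ rest.map pvMsp, m = ref := by
          intro m hm
          rcases List.mem_map.mp hm with ⟨p, hp, rfl⟩
          exact hdiff p hp
        rw [pv_foldl_all_eq _ _ hall]
        have hany : rest.any (fun policy => pvMsp policy != ref) = false := by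
          simp only [List.any_eq_false, bne_iff_ne, ne_eq, not_not]
          exact hdiff
        simp [hany]
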